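-- pv_equiv track=rewrite | github.com/miseop25/Back_Jun_Code_Study | Programmers/탐욕법/조이스틱/joyStick_ver2.py | solution
-- ===== SOURCE A (Python) =====
-- def solution(name):
--     ansList = []
--     answer = 0
--     a_len = 0
--
--     if "A" in name :
--         A_Index = name.index("A")
--         for a in name[A_Index :] :
--             if a == "A" :
--                 a_len += 1
--             else :
--                 break
--         if a_len == len(name) : return 0
--
--
--     else :
--         A_Index = -1
--
--     for i in name :
--         answer += min(abs(ord("A")- ord(i)), abs(ord("Z") - ord(i) + 1))
--     answer += len(name) - 1
--     ansList.append(answer)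
--     if A_Index > -1 :
--         answer = 0
--         for i in name[: A_Index] :
--             answer += min(abs(ord("A")- ord(i)), abs(ord("Z") - ord(i) + 1))
--         answer += A_Index -1
--
--         for i in range(len(name)-1,A_Index + a_len -1, -1) :
--             answer += min(abs(ord("A")- ord(name[i])), abs(ord("Z") - ord(name[i]) + 1)) + 1
--         ansList.append(answer)
--     return min(ansList)
-- ===== SOURCE B (Python) =====
-- def solution(name):
--     # closed form: vertical cost + horizontal moves; when an 'A' exists,
--     # skipping the first A-run (going left-then-wrap or straight) always wins
--     total = sum(min(abs(ord('A') - ord(c)), abs(ord('Z') - ord(c) + 1)) for c in name)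
--     if 'A' not in name:
--         return total + len(name) - 1
--     idx = name.index('A')
--     rest = name[idx:]
--     a_len = len(rest) - len(rest.lstrip('A'))
--     if a_len == len(name):
--         return 0
--     return total + len(name) - 1 - a_len
-- ===== Notes on version B (the rewrite author's own statement) =====
-- stated objective: simpler
-- what changed: B replaces A's construction of two candidate answers (full left-to-right cost plus a second candidate built with a backward index loop over the tail) and a final min() by a single closed-form formula: total vertical cost plus len-1, minus the length of the first consecutive run of the letter A when that letter occurs, using that the second candidate never loses.
import Mathlib
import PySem

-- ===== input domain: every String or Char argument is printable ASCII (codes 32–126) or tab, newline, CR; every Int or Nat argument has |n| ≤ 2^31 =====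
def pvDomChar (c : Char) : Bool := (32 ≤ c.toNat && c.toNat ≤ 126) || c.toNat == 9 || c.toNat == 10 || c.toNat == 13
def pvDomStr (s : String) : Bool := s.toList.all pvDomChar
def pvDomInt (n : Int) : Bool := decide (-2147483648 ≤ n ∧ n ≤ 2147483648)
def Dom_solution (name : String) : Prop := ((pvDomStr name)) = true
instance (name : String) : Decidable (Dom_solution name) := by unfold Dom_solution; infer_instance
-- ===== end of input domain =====

-- B replaces A's two-candidate construction (full-string candidate plus a backward
-- tail loop) by a single closed-form total, using that the skip-the-first-run
-- candidate never loses when the letter occurs; objective: simpler.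

-- ===== PORT A =====
def pvVertA (c : Char) : Int :=
  min |(65 : Int) - (c.toNat : Int)| |(90 : Int) - (c.toNat : Int) + 1|

-- the 'for a in name[A_Index:]: if a == "A": a_len += 1 else: break' loop
def pvARunA : List Char → Int
  | [] => 0
  | c :: t => if c = 'A' then 1 + pvARunA t else 0

def solution (name : String) : Int :=
  let l := name.toList
  -- answer after the 'for i in name' loop plus 'answer += len(name) - 1'
  let answer1 := (l.foldl (fun acc i => acc + pvVertA i) 0) + (l.length : Int) - 1
  match PySem.List.index? l 'A' with   -- '"A" in name' / 'name.index("A")' (single char)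
  | some aIdx =>
    let aLen := pvARunA (PySem.List.slice l (some (aIdx : Int)) none)
    if aLen = (l.length : Int) then 0
    else
      let answer2 :=
        ((PySem.List.slice l none (some (aIdx : Int))).foldl (fun acc i => acc + pvVertA i) 0)
          + (aIdx : Int) - 1
      let answer2 :=
        (PySem.List.pyRange ((l.length : Int) - 1) ((aIdx : Int) + aLen - 1) (-1)).foldl
          (fun acc i => acc + (pvVertA (PySem.List.pyGetD l i 'A') + 1)) answer2
      match PySem.List.min? [answer1, answer2] (fun y => y) with
      | some m => m
      | none => 0
  | none =>
    match PySem.List.min? [answer1] (fun y => y) with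
    | some m => m
    | none => 0

-- ===== PORT B =====
def pvVertB (c : Char) : Int :=
  min |(65 : Int) - (c.toNat : Int)| |(90 : Int) - (c.toNat : Int) + 1|

def solution_alt (name : String) : Int :=
  let l := name.toList
  let total := (l.map pvVertB).sum
  match PySem.List.index? l 'A' with
  | none => total + (l.length : Int) - 1
  | some idx =>
    let rest := l.drop idx                              -- name[idx:]
    -- a_len = len(rest) - len(rest.lstrip('A'))
    let aLen : Int := (rest.length : Int) - ((rest.dropWhile (fun c => c = 'A')).length : Int)
    if aLen = (l.length : Int) then 0
    else total + (l.length : Int) - 1 - aLen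

-- ===== PRECONDITION & SPEC =====
def Spec_solution (name : String) (out : Int) : Prop := out = solution_alt name
instance (name : String) (out : Int) : Decidable (Spec_solution name out) := by unfold Spec_solution; infer_instance

-- ===== CLAIM (what is proved, stated in full; the proofs are below) =====
def Claim_equal_solution : Prop := ∀ (name : String), Dom_solution name → Spec_solution name (solution name)

-- ===== LEMMAS AND PROOFS =====

theorem pvARunA_eq_takeWhile (xs : List Char) :
    pvARunA xs = ((xs.takeWhile (fun c => c = 'A')).length : Int) := by
  induction xs with
  | nil => simp [pvARunA]
  | cons c t ih =>
    by_cases hc : c = 'A'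
    · simp [pvARunA, hc, ih]; omega
    · simp [pvARunA, hc]

theorem pvVert_run_zero (xs : List Char) :
    ((xs.takeWhile (fun c => c = 'A')).map pvVertA).sum = 0 := by
  induction xs with
  | nil => simp
  | cons c t ih =>
    by_cases hc : c = 'A'
    · subst hc; simp [ih]; decide
    · simp [hc]

theorem pv_drop_takeWhile_length {p : Char → Bool} (xs : List Char) :
    xs.drop (xs.takeWhile p).length = xs.dropWhile p := by
  induction xs with
  | nil => simp
  | cons x t ih =>
    by_cases hp : p x <;> simp [hp, ih]

theorem solution_eq_alt (name : String) : solution name = solution_alt name := by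
  unfold solution solution_alt
  generalize name.toList = l
  cases h : PySem.List.index? l 'A' with
  | none =>
    have hVT : pvVertB = pvVertA := rfl
    simp only [h, PySem.List.min?_id_cons, List.foldl_nil, PySem.List.foldl_add, hVT]
    ring
  | some k =>
    simp only [h]
    obtain ⟨pre, suf, hsplit, hk, hpre⟩ := (PySem.List.index?_eq_some_iff l 'A' k).mp h
    have hdrop : l.drop k = 'A' :: suf := by
      subst hsplit; rw [← hk]; exact List.drop_left
    have htake : l.take k = pre := by
      subst hsplit; rw [← hk]; exact List.take_left
    have hrun : pvARunA (PySem.List.slice l (some (k : Int)) none)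
        = (((l.drop k).takeWhile (fun c => decide (c = 'A'))).length : Int) := by
      rw [PySem.List.slice_from_natCast, pvARunA_eq_takeWhile]
    have htwdw : (l.drop k).takeWhile (fun c => decide (c = 'A'))
        ++ (l.drop k).dropWhile (fun c => decide (c = 'A')) = l.drop k :=
      List.takeWhile_append_dropWhile
    have hlenrest : ((l.drop k).takeWhile (fun c => decide (c = 'A'))).length
          + ((l.drop k).dropWhile (fun c => decide (c = 'A'))).length
        = (l.drop k).length := by
      have hc := congrArg List.length htwdw
      rw [List.length_append] at hc
      exact hc
    have hBlen : ((l.drop k).length : Int)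
        - (((l.drop k).dropWhile (fun c => decide (c = 'A'))).length : Int)
        = (((l.drop k).takeWhile (fun c => decide (c = 'A'))).length : Int) := by
      omega
    rw [hrun, hBlen]
    by_cases hall :
        ((((l.drop k).takeWhile (fun c => decide (c = 'A'))).length : Int) = (l.length : Int))
    · simp [hall]
    · simp only [hall, if_false]
      have hr1 : 1 ≤ ((l.drop k).takeWhile (fun c => decide (c = 'A'))).length := by
        rw [hdrop]; simp
      -- evaluate the backward range loop of A
      rw [PySem.List.slice_to_natCast, htake, PySem.List.pyRange_neg_one_eq_reverse]
      have e1 : ((k : Int) + (((l.drop k).takeWhile (fun c => decide (c = 'A'))).length : Int)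
          - 1 + 1) = ((k + ((l.drop k).takeWhile (fun c => decide (c = 'A'))).length : Nat) : Int) := by
        push_cast; ring
      have e2 : ((l.length : Int) - 1 + 1) = (l.length : Int) := by ring
      rw [e1, e2, List.foldl_reverse]
      have hsum : ∀ (init : Int) (R : List Int),
          R.foldr (fun i acc => acc + (pvVertA (PySem.List.pyGetD l i 'A') + 1)) init
            = init + (R.map (fun i => pvVertA (PySem.List.pyGetD l i 'A') + 1)).sum := by
        intro init R
        induction R with
        | nil => simp
        | cons x t ih => simp [ih]; ring
      rw [hsum]
      have hmap : (PySem.List.pyRange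
            ((k + ((l.drop k).takeWhile (fun c => decide (c = 'A'))).length : Nat) : Int)
            (l.length : Int) 1).map
            (fun i => pvVertA (PySem.List.pyGetD l i 'A') + 1)
          = ((l.drop (k + ((l.drop k).takeWhile (fun c => decide (c = 'A'))).length)).map
              pvVertA).map (fun x => x + 1) := by
        have hmr := PySem.List.map_pyGetD_pyRange' l 'A'
          (a := ((k + ((l.drop k).takeWhile (fun c => decide (c = 'A'))).length : Nat) : Int))
          (Int.natCast_nonneg _)
        calc (PySem.List.pyRange
              ((k + ((l.drop k).takeWhile (fun c => decide (c = 'A'))).length : Nat) : Int)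
              (l.length : Int) 1).map
              (fun i => pvVertA (PySem.List.pyGetD l i 'A') + 1)
            = (((PySem.List.pyRange
                ((k + ((l.drop k).takeWhile (fun c => decide (c = 'A'))).length : Nat) : Int)
                (l.length : Int) 1).map
                (fun j => PySem.List.pyGetD l j 'A')).map pvVertA).map (fun x => x + 1) := by
              simp [List.map_map, Function.comp]
          _ = _ := by rw [hmr]; congr 2
      rw [hmap]
      have hdropkr : l.drop (k + ((l.drop k).takeWhile (fun c => decide (c = 'A'))).length)
          = (l.drop k).dropWhile (fun c => decide (c = 'A')) := by
        rw [← List.drop_drop, pv_drop_takeWhile_length]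
      rw [hdropkr]
      have hsplit1 : (((((l.drop k).dropWhile (fun c => decide (c = 'A'))).map pvVertA).map
            (fun x => x + 1)).sum : Int)
          = ((((l.drop k).dropWhile (fun c => decide (c = 'A'))).map pvVertA).sum : Int)
            + ((((l.drop k).dropWhile (fun c => decide (c = 'A'))).map pvVertA).length : Int) := by
        simp [Function.comp_def]
      have htot : (l.map pvVertA).sum
          = (pre.map pvVertA).sum
            + ((((l.drop k).dropWhile (fun c => decide (c = 'A'))).map pvVertA).sum : Int) := by
        have h0 : (((l.drop k).takeWhile (fun c => decide (c = 'A'))).map pvVertA).sum = 0 :=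
          pvVert_run_zero (l.drop k)
        conv_lhs => rw [← List.take_append_drop k l, htake, ← htwdw]
        simp only [List.map_append, List.sum_append]
        rw [h0]; ring
      have hkle : k ≤ l.length := by rw [hsplit, ← hk]; simp
      have hld : (l.drop k).length = l.length - k := by simp
      simp only [PySem.List.foldl_add, PySem.List.min?_id_cons, List.foldl_cons, List.foldl_nil]
      rw [hsplit1]
      have hVT : pvVertB = pvVertA := rfl
      rw [hVT]
      simp only [List.length_map]
      rw [min_def]
      split_ifs <;> omega

-- ===== VERDICT (by name: the statement is the Claim_ definition above) =====
theorem solution_spec : Claim_equal_solution := by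
  intro name _
  unfold Spec_solution
  exact solution_eq_alt name
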